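-- pv_equiv track=rewrite | github.com/Bitupan132/dip_course_assignments | assignment_1/src/Q3_Adaptive_Binarization.py | compute_block_positions
-- ===== SOURCE A (Python) =====
-- def compute_block_positions(image_shape, block_size, overlap):
--     step = block_size - overlap
--     positions = []
--     total_rows = image_shape[0]
--     total_cols = image_shape[1]
--
--     # collect positions that contains the NxN blocks
--     # there will be some pixels on the right side and on the bottom that are left out
--     for row in range(0, total_rows - block_size + 1, step):
--         for col in range(0, total_cols - block_size + 1, step):
--             positions.append((row, col))
--
--     # Edge Cases:
--     # A. collect positions that contains the bottom side's left out pixels' blocks.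
--     # for 512x512 image and 250x250 block size these will be: (262,0),(262,200)
--     for col in range(0, total_cols - block_size + 1, step):
--         positions.append((total_rows - block_size, col))
--
--     # B. collect positions that contains the right side's left out pixels' blocks.
--     # for 512x512 image and 250x250 block size these will be: (0,262),(200,262)
--     for row in range(0, total_rows - block_size + 1, step):
--         positions.append((row, total_cols - block_size))
--
--     # C. Still the bottom right block, (262,262), is left out:
--     positions.append((total_rows - block_size, total_cols - block_size))
--
--     # Bacause of the edge case handling logic there might be duplicates.
--     positions = list({p for p in positions})
--     positions.sort(key=lambda position: (position[0],position[1]))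
--
--     return positions
-- ===== SOURCE B (Python) =====
-- def compute_block_positions(image_shape, block_size, overlap):
--     step = block_size - overlap
--     rows = sorted(set(range(0, image_shape[0] - block_size + 1, step)) | {image_shape[0] - block_size})
--     cols = sorted(set(range(0, image_shape[1] - block_size + 1, step)) | {image_shape[1] - block_size})
--     # row-major product of strictly increasing coordinate lists is already
--     # sorted by (row, col), so no final sort or dedup is needed
--     return [(r, c) for r in rows for c in cols]
-- ===== Notes on version B (the rewrite author's own statement) =====
-- stated objective: simpler
-- what changed: Replaces four appending loops over 2-D positions plus a whole-list set-dedup and final sort by building the two deduplicated sorted 1-D coordinate lists (grid positions plus the edge position per axis) and returning their Cartesian product, which is already in (row, col) order.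
import Mathlib
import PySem

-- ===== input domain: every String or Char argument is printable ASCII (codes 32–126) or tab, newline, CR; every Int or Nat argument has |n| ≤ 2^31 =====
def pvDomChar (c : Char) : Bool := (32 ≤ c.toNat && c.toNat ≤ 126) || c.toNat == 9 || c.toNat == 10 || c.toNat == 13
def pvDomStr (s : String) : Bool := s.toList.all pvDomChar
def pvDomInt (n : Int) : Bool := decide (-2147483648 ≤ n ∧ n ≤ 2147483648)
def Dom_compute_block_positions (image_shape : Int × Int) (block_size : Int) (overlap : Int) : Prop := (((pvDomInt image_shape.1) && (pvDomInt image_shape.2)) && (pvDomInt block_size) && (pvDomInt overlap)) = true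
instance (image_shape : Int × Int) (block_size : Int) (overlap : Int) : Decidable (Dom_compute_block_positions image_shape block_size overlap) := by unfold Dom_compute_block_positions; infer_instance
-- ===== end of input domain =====

-- B replaces A's four appending loops + set-dedup + sort by the Cartesian
-- product of the two sorted deduplicated 1-D coordinate lists (simpler).


-- ===== PORT A =====
def compute_block_positions (image_shape : Int × Int) (block_size : Int) (overlap : Int) : List (Int × Int) :=
  let step := block_size - overlap
  let total_rows := image_shape.1
  let total_cols := image_shape.2
  let rows := PySem.List.pyRange 0 (total_rows - block_size + 1) step
  let cols := PySem.List.pyRange 0 (total_cols - block_size + 1) step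
  let positions : List (Int × Int) :=
    rows.foldl (fun acc row => cols.foldl (fun acc col => acc ++ [(row, col)]) acc) []
  let positions := cols.foldl (fun acc col => acc ++ [(total_rows - block_size, col)]) positions
  let positions := rows.foldl (fun acc row => acc ++ [(row, total_cols - block_size)]) positions
  let positions := positions ++ [(total_rows - block_size, total_cols - block_size)]
  -- list({p for p in positions}) followed by sort with key (p[0], p[1]):
  -- the set's iteration order is irrelevant because the key is injective on pairs
  PySem.List.sorted2 (PySem.Set.ofList positions) (fun p => p.1) (fun p => p.2)

-- ===== PORT B =====
def compute_block_positions_alt (image_shape : Int × Int) (block_size : Int) (overlap : Int) : List (Int × Int) :=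
  let step := block_size - overlap
  let rows := PySem.List.sorted
    (PySem.Set.union (PySem.Set.ofList (PySem.List.pyRange 0 (image_shape.1 - block_size + 1) step))
      [image_shape.1 - block_size]) (fun x => x)
  let cols := PySem.List.sorted
    (PySem.Set.union (PySem.Set.ofList (PySem.List.pyRange 0 (image_shape.2 - block_size + 1) step))
      [image_shape.2 - block_size]) (fun x => x)
  rows.flatMap (fun r => cols.map (fun c => (r, c)))

-- ===== PRECONDITION & SPEC =====
-- Pre_ excludes exactly block_size = overlap (step 0), where A's range() raises ValueError (B raises too).
def Pre_compute_block_positions (image_shape : Int × Int) (block_size : Int) (overlap : Int) : Prop :=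
  block_size ≠ overlap
instance (image_shape : Int × Int) (block_size : Int) (overlap : Int) : Decidable (Pre_compute_block_positions image_shape block_size overlap) := by unfold Pre_compute_block_positions; infer_instance

def pvWitness_compute_block_positions : (Int × Int) × Int × Int := ((7, 6), 3, 1)

def Spec_compute_block_positions (image_shape : Int × Int) (block_size : Int) (overlap : Int) (out : List (Int × Int)) : Prop := out = compute_block_positions_alt image_shape block_size overlap
instance (image_shape : Int × Int) (block_size : Int) (overlap : Int) (out : List (Int × Int)) : Decidable (Spec_compute_block_positions image_shape block_size overlap out) := by unfold Spec_compute_block_positions; infer_instance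

-- ===== CLAIM (what is proved, stated in full; the proofs are below) =====
def Claim_equal_compute_block_positions : Prop := ∀ (image_shape : Int × Int) (block_size : Int) (overlap : Int), Dom_compute_block_positions image_shape block_size overlap → Pre_compute_block_positions image_shape block_size overlap → Spec_compute_block_positions image_shape block_size overlap (compute_block_positions image_shape block_size overlap)

-- ===== LEMMAS AND PROOFS =====

-- the boolean "before" comparison that sorted2 with keys fst, snd uses on Int × Int
def pvLexLt (a b : Int × Int) : Bool :=
  decide (a.1 < b.1) || !decide (b.1 < a.1) && decide (a.2 < b.2)

-- strict lexicographic order as a Prop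
def pvLt (a b : Int × Int) : Prop := a.1 < b.1 ∨ (a.1 = b.1 ∧ a.2 < b.2)

lemma pvLexLt_iff (a b : Int × Int) : pvLexLt a b = true ↔ pvLt a b := by
  unfold pvLexLt pvLt
  simp only [Bool.or_eq_true, Bool.and_eq_true, Bool.not_eq_eq_eq_not, Bool.not_true,
    decide_eq_true_eq, decide_eq_false_iff_not]
  omega

-- insertBy with pvLexLt preserves "weakly sorted" (adjacent-downward: before b a = false)
lemma insertBy_pairwise_pvLexLt (x : Int × Int) (ys : List (Int × Int))
    (h : ys.Pairwise (fun a b => pvLexLt b a = false)) :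
    (PySem.List.insertBy pvLexLt x ys).Pairwise (fun a b => pvLexLt b a = false) := by
  induction ys with
  | nil =>
    simp [PySem.List.insertBy]
  | cons y ys ih =>
    rw [List.pairwise_cons] at h
    by_cases hxy : pvLexLt x y = true
    · have : PySem.List.insertBy pvLexLt x (y :: ys) = x :: y :: ys := by
        simp [PySem.List.insertBy, hxy]
      rw [this]
      refine List.Pairwise.cons ?_ (List.pairwise_cons.mpr h)
      intro z hz
      rw [List.mem_cons] at hz
      rcases hz with rfl | hz
      · rw [pvLexLt_iff] at hxy
        simp only [Bool.eq_false_iff, ne_eq, pvLexLt_iff]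
        unfold pvLt at hxy ⊢; omega
      · have hyz := h.1 z hz
        rw [pvLexLt_iff] at hxy
        simp only [Bool.eq_false_iff, ne_eq, pvLexLt_iff] at hyz ⊢
        unfold pvLt at hxy hyz ⊢; omega
    · have : PySem.List.insertBy pvLexLt x (y :: ys) = y :: PySem.List.insertBy pvLexLt x ys := by
        simp [PySem.List.insertBy, hxy]
      rw [this]
      refine List.Pairwise.cons ?_ (ih h.2)
      intro z hz
      rw [PySem.List.insertBy_mem_iff] at hz
      rcases hz with rfl | hz
      · simpa using hxy
      · exact h.1 z hz


lemma foldl_insertBy_pairwise (xs acc : List (Int × Int))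
    (h : acc.Pairwise (fun a b => pvLexLt b a = false)) :
    (xs.foldl (fun acc x => PySem.List.insertBy pvLexLt x acc) acc).Pairwise
      (fun a b => pvLexLt b a = false) := by
  induction xs generalizing acc with
  | nil => simpa using h
  | cons x xs ih => exact ih _ (insertBy_pairwise_pvLexLt x acc h)

lemma foldl_insertBy_perm (xs acc : List (Int × Int)) :
    (xs.foldl (fun acc x => PySem.List.insertBy pvLexLt x acc) acc).Perm (acc ++ xs) := by
  induction xs generalizing acc with
  | nil => simp
  | cons x xs ih =>
    refine ((ih (PySem.List.insertBy pvLexLt x acc)).trans ?_)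
    have h1 := PySem.List.insertBy_perm pvLexLt x acc
    exact (h1.append_right xs).trans
      (List.perm_middle (a := x) (l₁ := acc) (l₂ := xs)).symm

-- sorted2 with keys fst/snd equals any strictly-lex-increasing rearrangement
lemma sorted2_eq_of_perm_of_pairwise_lt (xs ys : List (Int × Int))
    (hperm : ys.Perm xs) (hpw : ys.Pairwise pvLt) :
    PySem.List.sorted2 xs (fun p => p.1) (fun p => p.2) = ys := by
  have hdef : PySem.List.sorted2 xs (fun p => p.1) (fun p => p.2) =
      xs.foldl (fun acc x => PySem.List.insertBy pvLexLt x acc) [] := by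
    rfl
  rw [hdef]
  set s := xs.foldl (fun acc x => PySem.List.insertBy pvLexLt x acc) [] with hs
  have hsp : s.Perm xs := by simpa using foldl_insertBy_perm xs []
  have hsw : s.Pairwise (fun a b => pvLexLt b a = false) :=
    foldl_insertBy_pairwise xs [] (by simp)
  -- both pairwise under a weak order that is antisymmetric on Int × Int
  refine List.eq_of_perm_of_sorted (le := fun a b => pvLexLt b a = false)
    ?_ hsw ?_ (hsp.trans hperm.symm)
  · intro a b _ _ hab hba
    simp only [Bool.eq_false_iff, ne_eq, pvLexLt_iff] at hab hba
    unfold pvLt at hab hba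
    have : a.1 = b.1 ∧ a.2 = b.2 := by omega
    exact Prod.ext this.1 this.2
  · refine hpw.imp ?_
    intro a b h
    simp only [Bool.eq_false_iff, ne_eq, pvLexLt_iff]
    unfold pvLt at h ⊢; omega

-- the row-major product of strictly increasing lists is strictly lex-increasing
lemma flatMap_pairwise_pvLt (rs cs : List Int)
    (hr : rs.Pairwise (· < ·)) (hc : cs.Pairwise (· < ·)) :
    (rs.flatMap (fun r => cs.map (fun c => (r, c)))).Pairwise pvLt := by
  induction rs with
  | nil => simp
  | cons r rs ih =>
    rw [List.pairwise_cons] at hr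
    rw [List.flatMap_cons, List.pairwise_append]
    refine ⟨?_, ih hr.2, ?_⟩
    · rw [List.pairwise_map]
      exact hc.imp (by intro a b h; exact Or.inr ⟨rfl, h⟩)
    · intro a ha b hb
      rw [List.mem_map] at ha
      rw [List.mem_flatMap] at hb
      obtain ⟨c, _, rfl⟩ := ha
      obtain ⟨r', hr', hb⟩ := hb
      rw [List.mem_map] at hb
      obtain ⟨c', _, rfl⟩ := hb
      exact Or.inl (hr.1 r' hr')

lemma mem_flatMap_prod (rs cs : List Int) (x : Int × Int) :
    x ∈ rs.flatMap (fun r => cs.map (fun c => (r, c))) ↔ x.1 ∈ rs ∧ x.2 ∈ cs := by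
  rw [List.mem_flatMap]
  constructor
  · rintro ⟨r, hr, hx⟩
    rw [List.mem_map] at hx
    obtain ⟨c, hc, rfl⟩ := hx
    exact ⟨hr, hc⟩
  · rintro ⟨h1, h2⟩
    exact ⟨x.1, h1, List.mem_map.mpr ⟨x.2, h2, rfl⟩⟩

lemma union_singleton_eq_ofList (xs : List Int) (e : Int) :
    PySem.Set.union (PySem.Set.ofList xs) [e] = PySem.Set.ofList (xs ++ [e]) := by
  simp [PySem.Set.union, PySem.Set.update, PySem.Set.ofList_eq_foldl, List.foldl_append]

-- ===== VERDICT (by name: the statement is the Claim_ definition above) =====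
theorem compute_block_positions_spec : Claim_equal_compute_block_positions := by
  intro image_shape block_size overlap _ _
  unfold Spec_compute_block_positions compute_block_positions compute_block_positions_alt
  simp only []
  set step := block_size - overlap with hstep
  set er := image_shape.1 - block_size with her
  set ec := image_shape.2 - block_size with hec
  set R := PySem.List.pyRange 0 (image_shape.1 - block_size + 1) step with hR
  set C := PySem.List.pyRange 0 (image_shape.2 - block_size + 1) step with hC
  -- flatten A's accumulation loops
  have hinner : ∀ (acc : List (Int × Int)),
      R.foldl (fun acc row => C.foldl (fun acc col => acc ++ [(row, col)]) acc) acc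
        = acc ++ R.flatMap (fun r => C.map (fun c => (r, c))) := by
    intro acc
    have hstep1 : ∀ (a : List (Int × Int)) (r : Int), r ∈ R →
        C.foldl (fun acc col => acc ++ [(r, col)]) a = a ++ C.map (fun c => (r, c)) := by
      intro a r _
      exact PySem.List.foldl_append_singleton_eq_map (l := C) (acc := a)
        (f := fun c => (r, c))
    exact (PySem.List.foldl_congr_mem _ _ (fun acc r => acc ++ C.map (fun c => (r, c))) _ hstep1).trans
      (PySem.List.foldl_append_eq_flatMap (l := R) (acc := acc)
        (g := fun r => C.map (fun c => (r, c))))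
  rw [hinner, PySem.List.foldl_append_singleton_eq_map,
    PySem.List.foldl_append_singleton_eq_map]
  rw [union_singleton_eq_ofList, union_singleton_eq_ofList]
  set L := ([] ++ R.flatMap (fun r => C.map (fun c => (r, c)))
      ++ C.map (fun col => (er, col)) ++ R.map (fun row => (row, ec))
      ++ [(er, ec)]) with hL
  set rs := PySem.List.sorted (PySem.Set.ofList (R ++ [er])) (fun x => x) with hrs
  set cs := PySem.List.sorted (PySem.Set.ofList (C ++ [ec])) (fun x => x) with hcs
  have hrp : rs.Pairwise (· < ·) := PySem.List.sorted_ofList_pairwise_lt _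
  have hcp : cs.Pairwise (· < ·) := PySem.List.sorted_ofList_pairwise_lt _
  set ys := rs.flatMap (fun r => cs.map (fun c => (r, c))) with hys
  have hpw : ys.Pairwise pvLt := flatMap_pairwise_pvLt rs cs hrp hcp
  -- ys is a permutation of the deduplicated position list
  have hynd : ys.Nodup := by
    refine hpw.imp ?_
    intro a b h hab
    unfold pvLt at h
    rw [hab] at h
    omega
  have hperm : ys.Perm (PySem.Set.ofList L) := by
    rw [List.perm_ext_iff_of_nodup hynd (PySem.Set.nodup_ofList L)]
    intro x
    rw [PySem.Set.mem_ofList, hys, mem_flatMap_prod, hrs, hcs,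
      PySem.List.mem_sorted, PySem.List.mem_sorted,
      PySem.Set.mem_ofList, PySem.Set.mem_ofList, hL]
    simp only [List.mem_append, List.mem_singleton, List.nil_append,
      mem_flatMap_prod, List.mem_map]
    constructor
    · rintro ⟨h1 | h1, h2 | h2⟩
      · exact Or.inl (Or.inl (Or.inl ⟨h1, h2⟩))
      · exact Or.inl (Or.inr ⟨x.1, h1, by rw [← h2]⟩)
      · exact Or.inl (Or.inl (Or.inr ⟨x.2, h2, by rw [← h1]⟩))
      · exact Or.inr (by rw [← h1, ← h2])
    · rintro (((⟨h1, h2⟩ | ⟨c, hc, hx⟩) | ⟨r, hr, hx⟩) | hx)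
      · exact ⟨Or.inl h1, Or.inl h2⟩
      · rw [← hx]; exact ⟨Or.inr rfl, Or.inl hc⟩
      · rw [← hx]; exact ⟨Or.inl hr, Or.inr rfl⟩
      · rw [hx]; exact ⟨Or.inr rfl, Or.inr rfl⟩
  exact sorted2_eq_of_perm_of_pairwise_lt _ ys hperm hpw
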